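-- pv_equiv track=rewrite | github.com/kelvinhuang0327/number-pattern-research | tools/analyze_prediction_115000019.py | cold_numbers_bet
-- ===== SOURCE A (Python) =====
-- from collections import Counter
--
-- MAX_NUM = 49
--
-- def cold_numbers_bet(history, window=100, exclude=None):
--     """Cold Numbers - least frequent in recent N draws"""
--     exclude = exclude or set()
--     recent = history[-window:] if len(history) >= window else history
--     all_nums = [n for d in recent for n in d['numbers']]
--     freq = Counter(all_nums)
--     candidates = [n for n in range(1, MAX_NUM + 1) if n not in exclude]
--     sorted_cold = sorted(candidates, key=lambda x: freq.get(x, 0))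
--     return sorted(sorted_cold[:6])
-- ===== SOURCE B (Python) =====
-- MAX_NUM = 49
--
-- def cold_numbers_bet(history, window=100, exclude=None):
--     """Cold Numbers - least frequent in recent N draws (bounded top-6 selection)"""
--     excl = set(exclude or ())
--     recent = history[-window:] if len(history) >= window else history
--     freq = {}
--     for d in recent:
--         for n in d['numbers']:
--             freq[n] = freq.get(n, 0) + 1
--     best = []  # at most 6 (count, number) pairs, kept in ascending lexicographic order
--     for n in range(1, MAX_NUM + 1):
--         if n in excl:
--             continue
--         pair = (freq.get(n, 0), n)
--         i = 0
--         while i < len(best) and best[i] <= pair: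
--             i += 1
--         best.insert(i, pair)
--         del best[6:]
--     return sorted(num for _, num in best)
-- ===== Notes on version B (the rewrite author's own statement) =====
-- stated objective: alternative
-- what changed: A stably sorts all 49 candidates by frequency and takes the first 6; B makes one pass over the candidates maintaining a bounded (size <= 6) insertion-ordered list of (count, number) pairs, whose lexicographic order reproduces A's stable tie-break by ascending number.
import Mathlib
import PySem

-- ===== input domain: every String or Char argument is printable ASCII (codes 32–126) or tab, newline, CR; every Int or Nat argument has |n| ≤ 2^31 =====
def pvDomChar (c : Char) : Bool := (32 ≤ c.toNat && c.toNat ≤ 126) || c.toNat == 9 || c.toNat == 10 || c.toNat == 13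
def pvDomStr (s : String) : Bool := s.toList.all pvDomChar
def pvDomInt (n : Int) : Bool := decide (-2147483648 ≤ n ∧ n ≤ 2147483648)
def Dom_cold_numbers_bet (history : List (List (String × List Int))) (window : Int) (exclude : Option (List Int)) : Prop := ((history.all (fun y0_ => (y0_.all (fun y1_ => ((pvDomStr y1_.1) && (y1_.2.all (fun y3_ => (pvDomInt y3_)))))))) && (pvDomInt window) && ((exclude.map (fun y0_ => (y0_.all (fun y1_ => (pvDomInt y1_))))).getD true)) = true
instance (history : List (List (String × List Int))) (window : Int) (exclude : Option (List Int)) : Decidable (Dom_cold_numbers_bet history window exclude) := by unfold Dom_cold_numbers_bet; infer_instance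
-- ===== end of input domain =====

-- B replaces A's full stable 49-element sort by a one-pass bounded (size ≤ 6) insertion
-- selection of the 6 least-frequent numbers (objective: alternative; same asymptotic cost here).

-- ===== PORT A =====
-- 'recent = history[-window:] if len(history) >= window else history' — this line is
-- textually identical in A and in B, so both ports share this helper.
def pvRecent (history : List (List (String × List Int))) (window : Int) : List (List (String × List Int)) :=
  if (history.length : Int) ≥ window then PySem.List.slice history (some (-window)) none else history

def cold_numbers_bet (history : List (List (String × List Int))) (window : Int) (exclude : Option (List Int)) : List Int :=
  -- 'exclude = exclude or set()': membership in an empty set equals membership in []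
  let excl : List Int := exclude.getD []
  let recent := pvRecent history window
  -- d['numbers'] raises KeyError when the key is absent; Pre_ excludes that, the default is unreachable there
  let all_nums : List Int := recent.flatMap (fun d => (PySem.Dict.mk d).getD "numbers" [])
  let freq := PySem.Dict.counter all_nums
  let candidates := (PySem.List.pyRange 1 50 1).filter (fun n => !(excl.contains n))
  let sorted_cold := PySem.List.sorted candidates (fun x => freq.getD x 0) false
  PySem.List.sorted (PySem.List.slice sorted_cold none (some 6)) (fun x => x) false

-- ===== PORT B =====
-- the while-loop insertion of Source B: insert pair before the first strictly lex-greater element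
def pvLexInsert (p : Int × Int) : List (Int × Int) → List (Int × Int)
  | [] => [p]
  | q :: t => if q.1 < p.1 ∨ (q.1 = p.1 ∧ q.2 ≤ p.2) then q :: pvLexInsert p t else p :: q :: t

def cold_numbers_bet_alt (history : List (List (String × List Int))) (window : Int) (exclude : Option (List Int)) : List Int :=
  let excl : PySem.Set Int := PySem.Set.ofList (exclude.getD [])
  let recent := pvRecent history window
  -- the nested counting loop of Source B
  let freq := recent.foldl
    (fun d dd => ((PySem.Dict.mk dd).getD "numbers" []).foldl (fun d n => d.insert n (d.getD n 0 + 1)) d)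
    PySem.Dict.empty
  -- the selection loop: skip excluded numbers, insert, 'del best[6:]'
  let best := (PySem.List.pyRange 1 50 1).foldl
    (fun best n => if PySem.Set.contains excl n then best else (pvLexInsert (freq.getD n 0, n) best).take 6) []
  PySem.List.sorted (best.map (fun q => q.2)) (fun x => x) false

-- ===== PRECONDITION & SPEC =====
-- Pre_ excludes exactly the inputs on which A raises KeyError: a draw inside the
-- selected window without the key "numbers".
def Pre_cold_numbers_bet (history : List (List (String × List Int))) (window : Int) (exclude : Option (List Int)) : Prop :=
  ∀ d ∈ pvRecent history window, "numbers" ∈ d.map Prod.fst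
instance (history : List (List (String × List Int))) (window : Int) (exclude : Option (List Int)) : Decidable (Pre_cold_numbers_bet history window exclude) := by unfold Pre_cold_numbers_bet; infer_instance

def pvWitness_cold_numbers_bet : (List (List (String × List Int))) × Int × Option (List Int) :=
  ([[("numbers", [7, 7, 3])]], 100, some [1, 2])

def Spec_cold_numbers_bet (history : List (List (String × List Int))) (window : Int) (exclude : Option (List Int)) (out : List Int) : Prop := out = cold_numbers_bet_alt history window exclude
instance (history : List (List (String × List Int))) (window : Int) (exclude : Option (List Int)) (out : List Int) : Decidable (Spec_cold_numbers_bet history window exclude out) := by unfold Spec_cold_numbers_bet; infer_instance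

-- ===== CLAIM (what is proved, stated in full; the proofs are below) =====
def Claim_equal_cold_numbers_bet : Prop := ∀ (history : List (List (String × List Int))) (window : Int) (exclude : Option (List Int)), Dom_cold_numbers_bet history window exclude → Pre_cold_numbers_bet history window exclude → Spec_cold_numbers_bet history window exclude (cold_numbers_bet history window exclude)

-- ===== LEMMAS AND PROOFS =====

-- truncating to 6 before inserting does not change the first 6 elements
lemma pvTake_lexInsert (p : Int × Int) : ∀ (s : List (Int × Int)) (k : Nat),
    (pvLexInsert p (s.take k)).take k = (pvLexInsert p s).take k := by
  intro s
  induction s with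
  | nil => intro k; simp
  | cons q t ih =>
    intro k
    cases k with
    | zero => simp
    | succ j =>
      simp only [List.take_succ_cons, pvLexInsert]
      by_cases h : q.1 < p.1 ∨ (q.1 = p.1 ∧ q.2 ≤ p.2)
      · simp only [if_pos h, List.take_succ_cons, ih j]
      · simp only [if_neg h, List.take_succ_cons]
        cases j with
        | zero => simp
        | succ i => simp [List.take_take]

-- on candidates larger than everything already selected, lexicographic insertion is
-- exactly A's stable insertion by frequency
lemma pvLexInsert_map_pair (f : Int → Int) (x : Int) : ∀ (s : List Int), (∀ y ∈ s, y < x) →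
    pvLexInsert (f x, x) (s.map (fun n => (f n, n)))
      = (PySem.List.insertBy (fun a b => decide (f a < f b)) x s).map (fun n => (f n, n)) := by
  intro s
  induction s with
  | nil => intro _; rfl
  | cons y t ih =>
    intro h
    have hyx : y < x := h y (by simp)
    simp only [List.map_cons, pvLexInsert, PySem.List.insertBy]
    by_cases hk : f y < f x ∨ (f y = f x ∧ y ≤ x)
    · have : ¬ (f x < f y) := by rcases hk with h1 | ⟨h1, _⟩ <;> omega
      simp only [this, decide_false, Bool.false_eq_true, if_false, if_pos hk, List.map_cons,
        ih (fun z hz => h z (by simp [hz]))]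
    · have : f x < f y := by omega
      simp [this, hk]

-- the bounded selection loop computes the first 6 of A's insertion-sort fold
lemma pvSelect_eq (f : Int → Int) : ∀ (cs : List Int) (s : List Int) (b : List (Int × Int)),
    cs.Pairwise (· < ·) → (∀ y ∈ s, ∀ x ∈ cs, y < x) →
    b = ((s.map (fun n => (f n, n))).take 6) →
    cs.foldl (fun b n => (pvLexInsert (f n, n) b).take 6) b
      = ((cs.foldl (fun acc x => PySem.List.insertBy (fun a b => decide (f a < f b)) x acc) s).map
          (fun n => (f n, n))).take 6 := by
  intro cs
  induction cs with
  | nil => intro s b _ _ hb; simpa using hb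
  | cons x rest ih =>
    intro s b hp hs hb
    simp only [List.foldl_cons]
    have hxrest : ∀ z ∈ rest, x < z := (List.pairwise_cons.mp hp).1
    have hstep : (pvLexInsert (f x, x) b).take 6
        = (((PySem.List.insertBy (fun a b => decide (f a < f b)) x s).map (fun n => (f n, n))).take 6) := by
      rw [hb, pvTake_lexInsert, pvLexInsert_map_pair f x s (fun y hy => hs y hy x (by simp))]
    exact ih (PySem.List.insertBy (fun a b => decide (f a < f b)) x s)
      ((pvLexInsert (f x, x) b).take 6)
      (List.pairwise_cons.mp hp).2
      (by
        intro y hy z hz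
        rcases (PySem.List.mem_insertBy _ x y s).mp hy with rfl | hys
        · exact hxrest z hz
        · exact hs y hys z (by simp [hz]))
      hstep

lemma pvContains_ofList (l : List Int) (n : Int) :
    PySem.Set.contains (PySem.Set.ofList l) n = l.contains n := by
  simp only [PySem.Set.contains_eq_listContains]
  by_cases h : n ∈ l <;> simp [PySem.Set.mem_ofList, h]

lemma pvRange_pairwise : (PySem.List.pyRange 1 50 1).Pairwise (· < ·) := by decide

-- ===== VERDICT (by name: the statement is the Claim_ definition above) =====
theorem cold_numbers_bet_spec : Claim_equal_cold_numbers_bet := by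
  intro history window exclude _ _
  unfold Spec_cold_numbers_bet cold_numbers_bet cold_numbers_bet_alt
  dsimp only
  set excl : List Int := exclude.getD [] with hexcl
  set recent := pvRecent history window with hrecent
  set all_nums : List Int := recent.flatMap (fun d => (PySem.Dict.mk d).getD "numbers" []) with hall
  -- B's counting loop is Counter(all_nums)
  have hfreq : recent.foldl
      (fun d dd => ((PySem.Dict.mk dd).getD "numbers" []).foldl (fun d n => d.insert n (d.getD n 0 + 1)) d)
      PySem.Dict.empty = PySem.Dict.counter all_nums := by
    rw [hall, ← List.foldl_flatMap]
    exact PySem.Dict.foldl_insert_getD_add_one_eq_counter _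
  rw [hfreq]
  set freq := PySem.Dict.counter all_nums with hfq
  set f : Int → Int := fun x => freq.getD x 0 with hf
  set candidates := (PySem.List.pyRange 1 50 1).filter (fun n => !(excl.contains n)) with hcand
  -- B's selection loop folds over exactly A's candidate list
  have hskip : (PySem.List.pyRange 1 50 1).foldl
      (fun best n => if PySem.Set.contains (PySem.Set.ofList excl) n then best
        else (pvLexInsert (f n, n) best).take 6) ([] : List (Int × Int))
      = candidates.foldl (fun best n => (pvLexInsert (f n, n) best).take 6) [] := by
    rw [hcand, List.foldl_filter]
    congr 1
    funext b n
    rw [pvContains_ofList]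
    cases h : excl.contains n
    · simp
    · simp
  rw [hskip]
  rw [pvSelect_eq f candidates [] []
    (List.Pairwise.filter _ pvRange_pairwise) (by intro y hy; simp at hy) (by simp)]
  rw [← PySem.List.sorted_eq_foldl_insertBy candidates f]
  rw [PySem.List.slice_to _ (by norm_num)]
  rw [List.map_take, List.map_map]
  simp [Function.comp_def]
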